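-- pv_equiv track=rewrite | github.com/szeis4/Szakdolgozat | main.py | movement_data_create
-- ===== SOURCE A (Python) =====
-- from collections import deque
--
-- def movement_data_create(trajectory, torques, amplitude=255, frequency=128):
--     movement_data_arr = []
--
--     values = torques
--
--     rotatable_values = deque(values)
--
--     for pos in trajectory:
--         actual_step = [0x2c, 0x4d, 0x01, 0x00, 0x01, amplitude, frequency]
--         rotatable_values.rotate(pos)
--         for value in rotatable_values:
--             actual_step.append(value)
--         rotatable_values.rotate(-pos)
--         movement_data_arr.append(actual_step)
--
--     return movement_data_arr
-- ===== SOURCE B (Python) =====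
-- def movement_data_create(trajectory, torques, amplitude=255, frequency=128):
--     header = [0x2c, 0x4d, 0x01, 0x00, 0x01, amplitude, frequency]
--     n = len(torques)
--     if n == 0:
--         return [header[:] for _ in trajectory]
--     # stage 1: build all n distinct rotated rows once, as windows of the doubled list
--     doubled = torques + torques
--     table = [header + doubled[n - r:2 * n - r] for r in range(n)]
--     # stage 2: each position just looks its residue up in the table
--     return [table[pos % n] for pos in trajectory]
-- ===== Notes on version B (the rewrite author's own statement) =====
-- stated objective: alternative
-- what changed: B replaces the mutating rotate/rotate-back deque loop by two staged passes: it precomputes a table of all n distinct rotated rows once as length-n windows of the doubled torques list, then maps every trajectory position to a table lookup keyed by pos % n, so no rotation work happens per position.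
import Mathlib
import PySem

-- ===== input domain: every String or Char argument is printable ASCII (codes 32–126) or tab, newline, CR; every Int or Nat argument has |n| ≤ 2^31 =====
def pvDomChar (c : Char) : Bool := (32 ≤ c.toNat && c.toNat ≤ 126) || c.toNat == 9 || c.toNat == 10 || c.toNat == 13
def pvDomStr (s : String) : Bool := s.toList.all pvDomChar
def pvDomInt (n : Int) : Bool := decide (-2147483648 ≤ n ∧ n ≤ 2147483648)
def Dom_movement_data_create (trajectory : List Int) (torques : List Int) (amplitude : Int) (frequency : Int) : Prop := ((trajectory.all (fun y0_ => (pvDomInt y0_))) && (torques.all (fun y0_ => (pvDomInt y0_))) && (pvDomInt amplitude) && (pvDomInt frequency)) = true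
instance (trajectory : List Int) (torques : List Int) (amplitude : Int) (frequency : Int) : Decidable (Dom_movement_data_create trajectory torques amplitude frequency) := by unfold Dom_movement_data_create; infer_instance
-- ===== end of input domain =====

-- B replaces A's mutating rotate/rotate-back deque loop by two staged passes: precompute a
-- table of all n rotated rows as windows of the doubled torques list, then look each
-- position's residue up in it (objective: alternative decomposition, no per-position rotation).


-- ===== PORT A =====
-- one right rotation of a deque (pop right, append left)
def rotROnce (l : List Int) : List Int :=
  match l.getLast? with
  | none => []
  | some x => x :: l.dropLast

-- deque.rotate(pos): library call, modelled as CPython does it — pos mod n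
-- single right rotations (rotate by a negative amount = rotate right by its
-- positive residue); no-op on the empty deque.
def dequeRotate (l : List Int) (pos : Int) : List Int :=
  if l.length = 0 then l
  else rotROnce^[(PySem.Int.mod pos (l.length : Int)).toNat] l

-- the loop body of A: build actual_step by appending each deque element, then
-- rotate the deque back; state = (movement_data_arr, rotatable_values)
def stepA (amplitude frequency : Int) (st : List (List Int) × List Int) (pos : Int) :
    List (List Int) × List Int :=
  let actual0 : List Int := [0x2c, 0x4d, 0x01, 0x00, 0x01, amplitude, frequency]
  let rot := dequeRotate st.2 pos
  let actual := rot.foldl (fun s v => s ++ [v]) actual0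
  (st.1 ++ [actual], dequeRotate rot (-pos))

def movement_data_create (trajectory : List Int) (torques : List Int) (amplitude : Int) (frequency : Int) : List (List Int) :=
  (trajectory.foldl (stepA amplitude frequency) ([], torques)).1

-- ===== PORT B =====
-- table[pos % n] is always in range (0 ≤ pos % n < n = table length), so the pyGetD
-- default [] is never produced.
def movement_data_create_alt (trajectory : List Int) (torques : List Int) (amplitude : Int) (frequency : Int) : List (List Int) :=
  let header : List Int := [0x2c, 0x4d, 0x01, 0x00, 0x01, amplitude, frequency]
  let n : Int := PySem.List.len torques
  if n = 0 then trajectory.map (fun _ => header)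
  else
    let doubled := torques ++ torques
    let table := (PySem.List.pyRange 0 n 1).map (fun r =>
      header ++ PySem.List.slice doubled (some (n - r)) (some (2*n - r)))
    trajectory.map (fun pos => PySem.List.pyGetD table (PySem.Int.mod pos n) [])

-- ===== PRECONDITION & SPEC =====
def Spec_movement_data_create (trajectory : List Int) (torques : List Int) (amplitude : Int) (frequency : Int) (out : List (List Int)) : Prop := out = movement_data_create_alt trajectory torques amplitude frequency
instance (trajectory : List Int) (torques : List Int) (amplitude : Int) (frequency : Int) (out : List (List Int)) : Decidable (Spec_movement_data_create trajectory torques amplitude frequency out) := by unfold Spec_movement_data_create; infer_instance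

-- ===== CLAIM (what is proved, stated in full; the proofs are below) =====
def Claim_equal_movement_data_create : Prop := ∀ (trajectory : List Int) (torques : List Int) (amplitude : Int) (frequency : Int), Dom_movement_data_create trajectory torques amplitude frequency → Spec_movement_data_create trajectory torques amplitude frequency (movement_data_create trajectory torques amplitude frequency)

-- ===== LEMMAS AND PROOFS =====

-- k right rotations = split at length - k (for k ≤ length)
theorem rotROnce_iter (l : List Int) (k : Nat) (hk : k ≤ l.length) :
    rotROnce^[k] l = l.drop (l.length - k) ++ l.take (l.length - k) := by
  induction k with
  | zero => simp
  | succ k ih =>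
    rw [Function.iterate_succ_apply', ih (Nat.le_of_succ_le hk)]
    have hm : l.length - k = (l.length - (k + 1)) + 1 := by omega
    have hlt : l.length - (k + 1) < l.length := by omega
    rw [hm, List.take_add_one, List.getElem?_eq_getElem hlt]
    simp only [Option.toList_some]
    rw [← List.append_assoc, rotROnce]
    rw [List.getLast?_concat, List.dropLast_concat]
    rw [List.drop_eq_getElem_cons hlt]
    rfl

theorem dequeRotate_eq (l : List Int) (pos : Int) (h : l ≠ []) :
    dequeRotate l pos =
      l.drop (l.length - (PySem.Int.mod pos (l.length : Int)).toNat) ++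
      l.take (l.length - (PySem.Int.mod pos (l.length : Int)).toNat) := by
  have hn : 0 < (l.length : Int) := by
    exact_mod_cast Nat.pos_of_ne_zero (by simpa using h)
  have hr := PySem.Int.mod_lt pos hn
  unfold dequeRotate
  rw [if_neg (by simpa using h)]
  exact rotROnce_iter l _ (by omega)

-- the residue of -pos is the complementary residue
theorem mod_neg_compl (pos n : Int) (hn : 0 < n) :
    PySem.Int.mod (-pos) n =
      if PySem.Int.mod pos n = 0 then 0 else n - PySem.Int.mod pos n := by
  rw [PySem.Int.mod_eq_emod_of_pos hn, PySem.Int.mod_eq_emod_of_pos hn]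
  have h1 : (-pos) % n = (n - pos % n) % n := by
    conv_lhs => rw [show -pos = (n - pos % n) + n * (-(pos / n) - 1) by
      have := Int.emod_add_mul_ediv pos n; ring_nf; omega]
    rw [Int.add_mul_emod_self_left]
  have h2 : 0 ≤ pos % n := Int.emod_nonneg pos (by omega)
  have h3 : pos % n < n := Int.emod_lt_of_pos pos hn
  rw [h1]
  by_cases h : pos % n = 0
  · simp [h]
  · rw [if_neg h, Int.emod_eq_of_lt (by omega) (by omega)]

-- rotating back restores the deque
theorem dequeRotate_back (l : List Int) (pos : Int) :
    dequeRotate (dequeRotate l pos) (-pos) = l := by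
  rcases eq_or_ne l [] with rfl | h
  · simp [dequeRotate]
  · have hn : 0 < (l.length : Int) := by
      exact_mod_cast Nat.pos_of_ne_zero (by simpa using h)
    have h2 := PySem.Int.mod_nonneg pos hn
    have h3 := PySem.Int.mod_lt pos hn
    have hrot := dequeRotate_eq l pos h
    have hlen : (dequeRotate l pos).length = l.length := by
      rw [hrot]
      simp only [List.length_append, List.length_drop, List.length_take]
      omega
    have hne : dequeRotate l pos ≠ [] := by
      intro hnil; rw [hnil] at hlen; simp at hlen; omega
    rw [dequeRotate_eq _ (-pos) hne, hlen, mod_neg_compl pos (l.length : Int) hn]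
    by_cases h0 : PySem.Int.mod pos (l.length : Int) = 0
    · rw [if_pos h0, hrot]
      simp [h0]
    · rw [if_neg h0, hrot]
      rw [show ((l.length : Int) - PySem.Int.mod pos (l.length : Int)).toNat
          = l.length - (PySem.Int.mod pos (l.length : Int)).toNat by omega]
      rw [show l.length - (l.length - (PySem.Int.mod pos (l.length : Int)).toNat)
          = (List.drop (l.length - (PySem.Int.mod pos (l.length : Int)).toNat) l).length by
        simp only [List.length_drop]]
      rw [List.drop_left, List.take_left, List.take_append_drop]

-- the fold over the trajectory, with the deque restored each iteration
theorem foldA (amplitude frequency : Int) (traj : List Int) (acc : List (List Int)) (l : List Int) :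
    (traj.foldl (stepA amplitude frequency) (acc, l)).1 =
      acc ++ traj.map (fun pos =>
        [0x2c, 0x4d, 0x01, 0x00, 0x01, amplitude, frequency] ++ dequeRotate l pos) := by
  induction traj generalizing acc l with
  | nil => simp
  | cons p ps ih =>
    simp only [List.foldl_cons, List.map_cons, stepA,
      PySem.List.foldl_append_singleton, dequeRotate_back]
    rw [ih]
    simp

-- the length-n window of the doubled list starting at n - k is the right rotation by k
theorem doubled_window (t : List Int) (k : Nat) (hk : k ≤ t.length) :
    ((t ++ t).drop (t.length - k)).take t.length =
      t.drop (t.length - k) ++ t.take (t.length - k) := by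
  rw [List.drop_append_of_le_length (by omega), List.take_append,
    List.take_of_length_le (by simp), List.length_drop]
  have e : t.length - (t.length - (t.length - k)) = t.length - k := by omega
  rw [e]

-- ===== VERDICT (by name: the statement is the Claim_ definition above) =====
theorem movement_data_create_spec : Claim_equal_movement_data_create := by
  intro trajectory torques amplitude frequency _
  unfold Spec_movement_data_create movement_data_create movement_data_create_alt
  rw [foldA, List.nil_append]
  simp only [PySem.List.len_eq]
  rcases eq_or_ne torques [] with rfl | h
  · simp [dequeRotate]
  · have hn : 0 < (torques.length : Int) := by
      exact_mod_cast Nat.pos_of_ne_zero (by simpa using h)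
    rw [if_neg (by omega)]
    apply List.map_congr_left
    intro pos _
    have h2 := PySem.Int.mod_nonneg pos hn
    have h3 := PySem.Int.mod_lt pos hn
    rw [PySem.List.pyGetD_map_pyRange_of_nonneg _ _ _ _ h2 h3]
    have hs : PySem.List.slice (torques ++ torques)
        (some ((torques.length : Int) - PySem.Int.mod pos (torques.length : Int)))
        (some (2 * (torques.length : Int) - PySem.Int.mod pos (torques.length : Int)))
        = torques.drop (torques.length - (PySem.Int.mod pos (torques.length : Int)).toNat)
          ++ torques.take (torques.length - (PySem.Int.mod pos (torques.length : Int)).toNat) := by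
      rw [PySem.List.slice_toNat _ (by omega) (by omega)]
      have e1 : ((torques.length : Int) - PySem.Int.mod pos (torques.length : Int)).toNat
          = torques.length - (PySem.Int.mod pos (torques.length : Int)).toNat := by omega
      have e2 : (2 * (torques.length : Int) - PySem.Int.mod pos (torques.length : Int)).toNat
          - ((torques.length : Int) - PySem.Int.mod pos (torques.length : Int)).toNat
          = torques.length := by omega
      rw [e2, e1]
      exact doubled_window torques _ (by omega)
    rw [dequeRotate_eq torques pos h, hs]
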